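-- pv_equiv track=rewrite | github.com/Srinivas-Raghav-VC/early-entry-late-drift | research/modules/data/token_count_probe.py | _char_span_to_token_span
-- ===== SOURCE A (Python) =====
-- def _char_span_to_token_span(
--     offsets: list[tuple[int, int]],
--     char_start: int,
--     char_end: int,
-- ) -> tuple[int, int] | None:
--     hits = [
--         idx
--         for idx, (s, e) in enumerate(offsets)
--         if e > s and not (e <= char_start or s >= char_end)
--     ]
--     if not hits:
--         return None
--     return (hits[0], hits[-1] + 1)
-- ===== SOURCE B (Python) =====
-- def _char_span_to_token_span(offsets, char_start, char_end):
--     first = None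
--     for idx, (s, e) in enumerate(offsets):
--         if e > s and not (e <= char_start or s >= char_end):
--             first = idx
--             break
--     if first is None:
--         return None
--     for idx in range(len(offsets) - 1, -1, -1):
--         s, e = offsets[idx]
--         if e > s and not (e <= char_start or s >= char_end):
--             return (first, idx + 1)
-- ===== Notes on version B (the rewrite author's own statement) =====
-- stated objective: alternative
-- what changed: Replaces the full list comprehension collecting all matching indices with two short-circuiting scans: a forward scan that stops at the first overlapping token and a backward scan that stops at the last, so no intermediate list is built.
import Mathlib
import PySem

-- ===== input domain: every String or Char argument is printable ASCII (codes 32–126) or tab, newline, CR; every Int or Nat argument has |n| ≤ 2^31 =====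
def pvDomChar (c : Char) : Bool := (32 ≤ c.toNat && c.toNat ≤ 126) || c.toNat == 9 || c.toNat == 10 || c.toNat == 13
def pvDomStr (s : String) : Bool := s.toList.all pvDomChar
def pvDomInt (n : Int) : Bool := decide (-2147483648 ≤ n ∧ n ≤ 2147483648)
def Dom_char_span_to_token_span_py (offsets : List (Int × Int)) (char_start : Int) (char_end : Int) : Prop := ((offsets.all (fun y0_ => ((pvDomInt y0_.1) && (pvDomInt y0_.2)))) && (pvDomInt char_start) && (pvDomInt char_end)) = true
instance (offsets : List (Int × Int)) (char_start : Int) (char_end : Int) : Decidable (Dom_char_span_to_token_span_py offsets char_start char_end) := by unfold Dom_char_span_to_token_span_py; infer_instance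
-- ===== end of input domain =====

-- B replaces A's comprehension collecting all matching indices by two short-circuiting
-- scans (forward for the first hit, backward for the last); equivalence of return values.

-- ===== PORT A =====
-- hits = [idx for idx, (s, e) in enumerate(offsets) if e > s and not (e <= char_start or s >= char_end)]
-- if not hits: return None;  return (hits[0], hits[-1] + 1)
def char_span_to_token_span_py (offsets : List (Int × Int)) (char_start : Int) (char_end : Int) : Option (Int × Int) :=
  let hits := ((PySem.List.enumerate offsets).filter
      (fun p => p.2.2 > p.2.1 && !(p.2.2 ≤ char_start || p.2.1 ≥ char_end))).map (·.1)
  match hits with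
  | [] => none
  | h :: t => some (h, t.getLastD h + 1)   -- hits[-1] of the nonempty list h :: t

-- ===== PORT B =====
-- the shared loop body: first index in the (index, (s, e)) list whose pair matches, else none
def pvScan (char_start char_end : Int) : List (Int × (Int × Int)) → Option Int
  | [] => none
  | (i, se) :: rest =>
    if se.2 > se.1 && !(se.2 ≤ char_start || se.1 ≥ char_end) then some i
    else pvScan char_start char_end rest

-- forward scan for the first hit; if none, None; else backward scan (reversed order) for the last
def char_span_to_token_span_py_alt (offsets : List (Int × Int)) (char_start : Int) (char_end : Int) : Option (Int × Int) :=
  match pvScan char_start char_end (PySem.List.enumerate offsets) with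
  | none => none
  | some first =>
    match pvScan char_start char_end (PySem.List.enumerate offsets).reverse with
    | none => none
    | some last => some (first, last + 1)

-- ===== PRECONDITION & SPEC =====
def Spec_char_span_to_token_span_py (offsets : List (Int × Int)) (char_start : Int) (char_end : Int) (out : Option (Int × Int)) : Prop := out = char_span_to_token_span_py_alt offsets char_start char_end
instance (offsets : List (Int × Int)) (char_start : Int) (char_end : Int) (out : Option (Int × Int)) : Decidable (Spec_char_span_to_token_span_py offsets char_start char_end out) := by unfold Spec_char_span_to_token_span_py; infer_instance

-- ===== CLAIM (what is proved, stated in full; the proofs are below) =====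
def Claim_equal_char_span_to_token_span_py : Prop := ∀ (offsets : List (Int × Int)) (char_start : Int) (char_end : Int), Dom_char_span_to_token_span_py offsets char_start char_end → Spec_char_span_to_token_span_py offsets char_start char_end (char_span_to_token_span_py offsets char_start char_end)

-- ===== LEMMAS AND PROOFS =====

-- the short-circuiting scan returns the head of the filtered index list
theorem pvScan_eq_head (char_start char_end : Int) (l : List (Int × (Int × Int))) :
    pvScan char_start char_end l =
      ((l.filter (fun p => p.2.2 > p.2.1 && !(p.2.2 ≤ char_start || p.2.1 ≥ char_end))).map (·.1)).head? := by
  induction l with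
  | nil => rfl
  | cons p rest ih =>
    obtain ⟨i, se⟩ := p
    rw [pvScan, List.filter_cons]
    by_cases hc : (se.2 > se.1 && !(se.2 ≤ char_start || se.1 ≥ char_end)) = true
    · rw [if_pos hc, if_pos hc, List.map_cons, List.head?_cons]
    · rw [if_neg hc, if_neg hc, ih]

theorem pvGetLast?_cons_eq (h : Int) (t : List Int) : (h :: t).getLast? = some (t.getLastD h) := by
  induction t generalizing h with
  | nil => rfl
  | cons x xs ih => rw [List.getLast?_cons_cons, ih, List.getLastD_cons]

theorem char_span_to_token_span_py_eq (offsets : List (Int × Int)) (char_start char_end : Int) :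
    char_span_to_token_span_py offsets char_start char_end =
      char_span_to_token_span_py_alt offsets char_start char_end := by
  unfold char_span_to_token_span_py char_span_to_token_span_py_alt
  rw [pvScan_eq_head, pvScan_eq_head, List.filter_reverse, List.map_reverse, List.head?_reverse]
  cases hhits : ((PySem.List.enumerate offsets).filter
      (fun p => p.2.2 > p.2.1 && !(p.2.2 ≤ char_start || p.2.1 ≥ char_end))).map (·.1) with
  | nil => simp
  | cons h t =>
    simp only [List.head?_cons]
    rw [pvGetLast?_cons_eq]

-- ===== VERDICT (by name: the statement is the Claim_ definition above) =====
theorem char_span_to_token_span_py_spec : Claim_equal_char_span_to_token_span_py := by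
  intro offsets cs ce _
  unfold Spec_char_span_to_token_span_py
  exact char_span_to_token_span_py_eq offsets cs ce
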